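-- pv_equiv track=rewrite | github.com/h-ismkhan/run-revnano-on-windows | contactmap/oxdna2contact.py | get_staple_section_info
-- ===== SOURCE A (Python) =====
-- def get_staple_section_info(base_i53, scaffold_circular, scaffold_len) :
-- 	"""Returns number of staple sections, and a semicolon delimited string of section lengths,
-- 	given the i53 index for each base on the staple
-- 	"""
--
-- 	# base_i53, are the i53 indexes bound to on the scaffold, as you traverse the staple in 5' to 3' direction
-- 	i53_previous = None
--
-- 	# find length of staple sections
-- 	s = 1 			# length of current section, in bases
-- 	seclen = []
--
-- 	for i, i53 in enumerate(base_i53) :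
-- 		if i < len(base_i53) - 1: 					# go up to penultimate i53
-- 			pair = (i53, base_i53[i+1])
--
-- 			a = sum([v == -1 for v in pair]) == 1  	# any pair containing a single -1 is a border
-- 			b = abs(pair[0] - pair[1]) > 1 			# any pair with an i53 distance greater than 1 is a border
--
-- 													# ...UNLESS the scaffold is circular,
-- 													# and the i53 change corresponds to going around to other end of scaffold
-- 			if scaffold_circular :
-- 				if (pair == (0, scaffold_len-1)) or (pair == (scaffold_len-1, 0)) :
-- 					b = False
--
-- 			if a or b:
-- 				# border between sections found
-- 				seclen.append(s)
-- 				s = 1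
-- 			else :
-- 				s += 1
-- 		else :
-- 			# at last element in list: add length of final staple section
-- 			seclen.append(s)
--
-- 	# format section length list, into a semicolon delimited string
-- 	return len(seclen), seclen
-- ===== SOURCE B (Python) =====
-- def is_border(a, b, scaffold_circular, scaffold_len):
--     # a pair with exactly one -1 is always a border
--     if (a == -1) != (b == -1):
--         return True
--     # circular wrap-around between scaffold ends is not a border
--     if scaffold_circular and (a, b) in ((0, scaffold_len - 1), (scaffold_len - 1, 0)):
--         return False
--     return abs(a - b) > 1
--
-- def get_staple_section_info(base_i53, scaffold_circular, scaffold_len):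
--     n = len(base_i53)
--     if n == 0:
--         return 0, []
--     cuts = [0] + [i + 1 for i, (a, b) in enumerate(zip(base_i53, base_i53[1:]))
--                   if is_border(a, b, scaffold_circular, scaffold_len)] + [n]
--     lengths = [q - p for p, q in zip(cuts, cuts[1:])]
--     return len(lengths), lengths
-- ===== Notes on version B (the rewrite author's own statement) =====
-- stated objective: alternative
-- what changed: B replaces A's single running-length loop (accumulating the current section length inline) by a border predicate plus a cut-position list built in one comprehension and a separate consecutive-difference pass over the cuts.
import Mathlib
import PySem

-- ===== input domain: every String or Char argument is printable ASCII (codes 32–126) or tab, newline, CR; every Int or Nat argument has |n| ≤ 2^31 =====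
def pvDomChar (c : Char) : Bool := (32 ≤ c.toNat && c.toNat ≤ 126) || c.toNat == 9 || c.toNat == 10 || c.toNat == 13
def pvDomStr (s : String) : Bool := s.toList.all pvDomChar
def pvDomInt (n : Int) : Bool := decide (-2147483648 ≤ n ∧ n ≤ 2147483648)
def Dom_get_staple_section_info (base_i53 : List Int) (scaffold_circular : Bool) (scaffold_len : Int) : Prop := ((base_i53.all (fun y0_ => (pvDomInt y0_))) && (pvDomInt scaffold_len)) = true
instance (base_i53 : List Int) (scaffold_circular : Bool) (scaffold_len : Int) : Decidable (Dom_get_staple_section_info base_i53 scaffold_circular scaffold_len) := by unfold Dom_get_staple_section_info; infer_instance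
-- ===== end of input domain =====

-- B re-decomposes A's running-length loop into border-index cuts plus consecutive differences ('alternative'); equal return value proved below.

-- ===== PORT A =====
-- A's border test for the adjacent pair (v, nxt): 'a' = exactly one -1, 'b' = gap > 1, reset by the circular-wrap exception
def borderA (scaffold_circular : Bool) (scaffold_len : Int) (v nxt : Int) : Bool :=
  let a := ((if v = -1 then (1 : Int) else 0) + (if nxt = -1 then (1 : Int) else 0)) == 1
  let b := decide (1 < |v - nxt|)
  let b := if scaffold_circular && ((v == 0 && nxt == scaffold_len - 1) || (v == scaffold_len - 1 && nxt == 0)) then false else b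
  a || b

-- A's 'for i, i53 in enumerate(base_i53)' loop, state (s, seclen); index i+1 is in range whenever the branch reads it (i < len-1)
def loopA (scaffold_circular : Bool) (scaffold_len : Int) (base : List Int) :
    List (Int × Int) → Int → List Int → Int × List Int
  | [], s, seclen => (s, seclen)
  | (i, v) :: rest, s, seclen =>
    if i < (base.length : Int) - 1 then
      let nxt := (PySem.List.pyGet? base (i + 1)).getD 0
      if borderA scaffold_circular scaffold_len v nxt then
        loopA scaffold_circular scaffold_len base rest 1 (seclen ++ [s])
      else
        loopA scaffold_circular scaffold_len base rest (s + 1) seclen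
    else
      loopA scaffold_circular scaffold_len base rest s (seclen ++ [s])

def get_staple_section_info (base_i53 : List Int) (scaffold_circular : Bool) (scaffold_len : Int) : Int × List Int :=
  let r := loopA scaffold_circular scaffold_len base_i53 (PySem.List.enumerate base_i53 0) 1 []
  ((r.2.length : Int), r.2)

-- ===== PORT B =====
def is_border (a b : Int) (scaffold_circular : Bool) (scaffold_len : Int) : Bool :=
  if (a == -1) != (b == -1) then true
  else if scaffold_circular && ((a == 0 && b == scaffold_len - 1) || (a == scaffold_len - 1 && b == 0)) then false
  else decide (1 < |a - b|)

def get_staple_section_info_alt (base_i53 : List Int) (scaffold_circular : Bool) (scaffold_len : Int) : Int × List Int :=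
  if base_i53.length = 0 then (0, [])
  else
    let n : Int := base_i53.length
    let cuts : List Int :=
      0 :: ((PySem.List.enumerate (base_i53.zip base_i53.tail) 0).filterMap
              (fun p => if is_border p.2.1 p.2.2 scaffold_circular scaffold_len then some (p.1 + 1) else none) ++ [n])
    let lengths := (cuts.zip cuts.tail).map (fun p => p.2 - p.1)
    ((lengths.length : Int), lengths)

-- ===== PRECONDITION & SPEC =====
def Spec_get_staple_section_info (base_i53 : List Int) (scaffold_circular : Bool) (scaffold_len : Int) (out : Int × List Int) : Prop := out = get_staple_section_info_alt base_i53 scaffold_circular scaffold_len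
instance (base_i53 : List Int) (scaffold_circular : Bool) (scaffold_len : Int) (out : Int × List Int) : Decidable (Spec_get_staple_section_info base_i53 scaffold_circular scaffold_len out) := by unfold Spec_get_staple_section_info; infer_instance

-- ===== CLAIM (what is proved, stated in full; the proofs are below) =====
def Claim_equal_get_staple_section_info : Prop := ∀ (base_i53 : List Int) (scaffold_circular : Bool) (scaffold_len : Int), Dom_get_staple_section_info base_i53 scaffold_circular scaffold_len → Spec_get_staple_section_info base_i53 scaffold_circular scaffold_len (get_staple_section_info base_i53 scaffold_circular scaffold_len)

-- ===== LEMMAS AND PROOFS =====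

-- common reference: the list of section lengths, by direct recursion on the staple
def go (br : Int → Int → Bool) : Int → Int → List Int → List Int
  | s, _, [] => [s]
  | s, a, b :: t => if br a b then s :: go br 1 b t else go br (s + 1) b t

-- cut positions (border index + 1), by direct recursion
def cutsF (br : Int → Int → Bool) : Int → Int → List Int → List Int
  | _, _, [] => []
  | p, x, y :: t => if br x y then (p + 1) :: cutsF br (p + 1) y t else cutsF br (p + 1) y t

def diffs (c : List Int) : List Int := (c.zip c.tail).map (fun p => p.2 - p.1)

theorem border_eq (c : Bool) (L a b : Int) : borderA c L a b = is_border a b c L := by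
  unfold borderA is_border
  by_cases ha : a = -1 <;> by_cases hb : b = -1 <;> simp [ha, hb]

theorem diffs_cons (a b : Int) (r : List Int) : diffs (a :: b :: r) = (b - a) :: diffs (b :: r) := by
  simp [diffs]

theorem cuts_eq (circ : Bool) (L : Int) :
    ∀ (t : List Int) (x : Int) (k : Int),
      (PySem.List.enumerate ((x :: t).zip t) k).filterMap
        (fun p => if is_border p.2.1 p.2.2 circ L then some (p.1 + 1) else none)
      = cutsF (fun a b => is_border a b circ L) k x t := by
  intro t
  induction t with
  | nil => intro x k; simp [cutsF, PySem.List.enumerate_nil]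
  | cons y t ih =>
    intro x k
    simp only [List.zip_cons_cons, PySem.List.enumerate_cons, List.filterMap_cons, cutsF]
    split_ifs with h <;> simp [ih y (k + 1)]

theorem diffs_cutsF (br : Int → Int → Bool) :
    ∀ (t : List Int) (x c p : Int),
      diffs (c :: (cutsF br p x t ++ [p + 1 + (t.length : Int)])) = go br (p + 1 - c) x t := by
  intro t
  induction t with
  | nil => intro x c p; simp [cutsF, diffs, go]
  | cons y t ih =>
    intro x c p
    simp only [cutsF, go]
    split_ifs with h
    · rw [List.cons_append, diffs_cons]
      have := ih y (p + 1) (p + 1)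
      simp only [List.length_cons] at *
      push_cast
      rw [show (p + 1 + ((t.length : Int) + 1)) = (p + 1) + 1 + (t.length : Int) by ring, this]
      norm_num
    · have := ih y c (p + 1)
      simp only [List.length_cons] at *
      push_cast
      rw [show (p + 1 + ((t.length : Int) + 1)) = (p + 1) + 1 + (t.length : Int) by ring, this]
      rw [show (p + 1 + 1 - c) = (p + 1 - c) + 1 by ring]

theorem loopA_go (circ : Bool) (L : Int) :
    ∀ (t : List Int) (x : Int) (pre : List Int) (s : Int) (acc : List Int),
      (loopA circ L (pre ++ x :: t) (PySem.List.enumerate (x :: t) (pre.length : Int)) s acc).2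
      = acc ++ go (fun a b => is_border a b circ L) s x t := by
  intro t
  induction t with
  | nil =>
    intro x pre s acc
    rw [PySem.List.enumerate_cons, PySem.List.enumerate_nil]
    unfold loopA
    rw [if_neg (by simp only [List.length_append, List.length_cons, List.length_nil]; omega)]
    simp [loopA, go]
  | cons y t ih =>
    intro x pre s acc
    rw [PySem.List.enumerate_cons]
    unfold loopA
    rw [if_pos (by simp only [List.length_append, List.length_cons]; omega)]
    have hget : PySem.List.pyGet? (pre ++ x :: y :: t) ((pre.length : Int) + 1) = some y := by
      have h := PySem.List.pyGet?_append_length (pre := pre ++ [x]) (y := y) (ys := t)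
      simpa [List.append_assoc] using h
    rw [hget]
    have hre : pre ++ x :: y :: t = (pre ++ [x]) ++ y :: t := by simp
    have hlen : ((pre.length : Int) + 1) = (((pre ++ [x]).length : Int)) := by
      simp [List.length_append]
    simp only [Option.getD_some, border_eq, go]
    split_ifs with h
    · rw [hre, hlen, ih y (pre ++ [x]) 1 (acc ++ [s])]
      simp
    · rw [hre, hlen, ih y (pre ++ [x]) (s + 1) acc]

-- ===== VERDICT (by name: the statement is the Claim_ definition above) =====
theorem get_staple_section_info_spec : Claim_equal_get_staple_section_info := by
  intro base circ L _
  unfold Spec_get_staple_section_info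
  cases base with
  | nil =>
    simp [get_staple_section_info, get_staple_section_info_alt, loopA, PySem.List.enumerate_nil]
  | cons x t =>
    have hA := loopA_go circ L t x [] 1 []
    simp only [List.nil_append, List.length_nil, Nat.cast_zero] at hA
    have hlist : diffs (0 :: (cutsF (fun a b => is_border a b circ L) 0 x t
        ++ [(((x :: t).length : Nat) : Int)]))
        = go (fun a b => is_border a b circ L) 1 x t := by
      have h0 := diffs_cutsF (fun a b => is_border a b circ L) t x 0 0
      rw [show (((x :: t).length : Nat) : Int) = 0 + 1 + (t.length : Int) by
        push_cast [List.length_cons]; ring]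
      simpa using h0
    simp only [diffs, List.tail_cons] at hlist
    simp only [get_staple_section_info, get_staple_section_info_alt]
    rw [if_neg (by simp)]
    simp only [List.tail_cons, cuts_eq circ L t x 0, hA, hlist]
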